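-- pv_equiv track=rewrite | github.com/aneesh64/experimental-vliw-simd | tools/scheduler.py | _has_bank_conflict
-- ===== SOURCE A (Python) =====
-- from typing import List, Optional, Dict, Tuple, Any, Literal
--
-- def _has_bank_conflict(existing_ports: List[Tuple[int, int]],
--                        new_ports: List[Tuple[int, int]],
--                        has_valu: bool,
--                        n_banks: int = 8) -> bool:
--     """
--     Check if adding new_ports would exceed the TDP read capacity.
--
--     TDP architecture: Port A + Port B → up to 2 reads per bank per cycle.
--     Port B may be unavailable (WB write), but the scheduler can't predict
--     cross-bundle WB writes, so we optimistically allow 2 reads.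
--     Conflict if 3+ reads target the same bank.
--     """
--     bank_reads: Dict[int, int] = {}
--     for _port, reg in existing_ports:
--         bank = reg % n_banks
--         bank_reads[bank] = bank_reads.get(bank, 0) + 1
--     for _port, reg in new_ports:
--         bank = reg % n_banks
--         current = bank_reads.get(bank, 0)
--         if current >= 2:  # Port A + Port B already used
--             return True
--         bank_reads[bank] = current + 1
--     return False
-- ===== SOURCE B (Python) =====
-- def _has_bank_conflict(existing_ports, new_ports, has_valu, n_banks=8):
--     existing = {}
--     for _port, reg in existing_ports:
--         bank = reg % n_banks
--         existing[bank] = existing.get(bank, 0) + 1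
--     new_banks = [reg % n_banks for _port, reg in new_ports]
--     return any(existing.get(b, 0) + new_banks.count(b) >= 3 for b in set(new_banks))
-- ===== Notes on version B (the rewrite author's own statement) =====
-- stated objective: simpler
-- what changed: Replaced A's stateful interleaved pass over new_ports with early exit by mapping new_ports to their banks once and checking, over the distinct new banks, whether existing count plus new count reaches 3.
import Mathlib
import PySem

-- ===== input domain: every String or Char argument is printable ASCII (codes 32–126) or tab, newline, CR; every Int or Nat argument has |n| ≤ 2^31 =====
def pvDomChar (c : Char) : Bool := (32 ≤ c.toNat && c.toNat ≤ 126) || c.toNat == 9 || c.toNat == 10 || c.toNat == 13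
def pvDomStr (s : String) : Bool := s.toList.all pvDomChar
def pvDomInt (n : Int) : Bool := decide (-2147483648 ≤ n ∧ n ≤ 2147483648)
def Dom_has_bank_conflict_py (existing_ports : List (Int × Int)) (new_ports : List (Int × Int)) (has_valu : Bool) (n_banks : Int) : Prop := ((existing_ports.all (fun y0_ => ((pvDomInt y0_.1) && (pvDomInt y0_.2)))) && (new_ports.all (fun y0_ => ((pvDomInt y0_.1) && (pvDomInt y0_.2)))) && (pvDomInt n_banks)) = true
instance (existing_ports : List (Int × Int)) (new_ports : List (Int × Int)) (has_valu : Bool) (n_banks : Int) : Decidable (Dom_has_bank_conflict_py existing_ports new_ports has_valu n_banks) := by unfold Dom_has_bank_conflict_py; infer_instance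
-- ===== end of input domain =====

-- B replaces A's stateful early-exit pass over new_ports by a per-distinct-bank
-- count-and-compare scan (objective: simpler). Equivalence of return values is proved
-- on Pre_ (n_banks ≠ 0 unless both lists are empty; Python raises ZeroDivisionError otherwise).

-- ===== PORT A =====
-- A's second loop: early return True when the bank already has 2 reads, else record the read.
def pvALoop (bank_reads : PySem.Dict Int Int) (rest : List (Int × Int)) (n_banks : Int) : Bool :=
  match rest with
  | [] => false
  | p :: rest =>
    let bank := PySem.Int.mod p.2 n_banks
    let current := bank_reads.getD bank 0
    if current ≥ 2 then true
    else pvALoop (bank_reads.insert bank (current + 1)) rest n_banks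

def has_bank_conflict_py (existing_ports : List (Int × Int)) (new_ports : List (Int × Int)) (has_valu : Bool) (n_banks : Int) : Bool :=
  let bank_reads : PySem.Dict Int Int :=
    existing_ports.foldl
      (fun d p => d.insert (PySem.Int.mod p.2 n_banks) (d.getD (PySem.Int.mod p.2 n_banks) 0 + 1))
      PySem.Dict.empty
  pvALoop bank_reads new_ports n_banks

-- ===== PORT B =====
def has_bank_conflict_py_alt (existing_ports : List (Int × Int)) (new_ports : List (Int × Int)) (has_valu : Bool) (n_banks : Int) : Bool :=
  let existing : PySem.Dict Int Int :=
    existing_ports.foldl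
      (fun d p => d.insert (PySem.Int.mod p.2 n_banks) (d.getD (PySem.Int.mod p.2 n_banks) 0 + 1))
      PySem.Dict.empty
  let new_banks := new_ports.map (fun p => PySem.Int.mod p.2 n_banks)
  (PySem.Set.ofList new_banks).any (fun b => existing.getD b 0 + (new_banks.count b : Int) ≥ 3)

-- ===== PRECONDITION & SPEC =====
-- Pre_ excludes exactly the inputs where Python A raises ZeroDivisionError:
-- n_banks = 0 with at least one port to reduce (reg % 0).
def Pre_has_bank_conflict_py (existing_ports : List (Int × Int)) (new_ports : List (Int × Int)) (has_valu : Bool) (n_banks : Int) : Prop :=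
  n_banks ≠ 0 ∨ (existing_ports = [] ∧ new_ports = [])
instance (existing_ports : List (Int × Int)) (new_ports : List (Int × Int)) (has_valu : Bool) (n_banks : Int) : Decidable (Pre_has_bank_conflict_py existing_ports new_ports has_valu n_banks) := by unfold Pre_has_bank_conflict_py; infer_instance

def pvWitness_has_bank_conflict_py : (List (Int × Int)) × (List (Int × Int)) × Bool × Int :=
  ([(0, 1)], [(1, 9)], true, 8)

def Spec_has_bank_conflict_py (existing_ports : List (Int × Int)) (new_ports : List (Int × Int)) (has_valu : Bool) (n_banks : Int) (out : Bool) : Prop := out = has_bank_conflict_py_alt existing_ports new_ports has_valu n_banks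
instance (existing_ports : List (Int × Int)) (new_ports : List (Int × Int)) (has_valu : Bool) (n_banks : Int) (out : Bool) : Decidable (Spec_has_bank_conflict_py existing_ports new_ports has_valu n_banks out) := by unfold Spec_has_bank_conflict_py; infer_instance

-- ===== CLAIM (what is proved, stated in full; the proofs are below) =====
def Claim_equal_has_bank_conflict_py : Prop := ∀ (existing_ports : List (Int × Int)) (new_ports : List (Int × Int)) (has_valu : Bool) (n_banks : Int), Dom_has_bank_conflict_py existing_ports new_ports has_valu n_banks → Pre_has_bank_conflict_py existing_ports new_ports has_valu n_banks → Spec_has_bank_conflict_py existing_ports new_ports has_valu n_banks (has_bank_conflict_py existing_ports new_ports has_valu n_banks)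

-- ===== LEMMAS AND PROOFS =====

-- A's early-exit loop fires iff some bank touched by the remaining ports reaches 3 total reads.
lemma pvALoop_iff (n_banks : Int) (l : List (Int × Int)) (d : PySem.Dict Int Int) :
    pvALoop d l n_banks = true ↔
      ∃ b ∈ l.map (fun p => PySem.Int.mod p.2 n_banks),
        d.getD b 0 + ((l.map (fun p => PySem.Int.mod p.2 n_banks)).count b : Int) ≥ 3 := by
  induction l generalizing d with
  | nil => simp [pvALoop]
  | cons p rest ih =>
    simp only [pvALoop, List.map_cons]
    set b0 := PySem.Int.mod p.2 n_banks with hb0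
    by_cases hc : d.getD b0 0 ≥ 2
    · rw [if_pos hc]
      constructor
      · intro _
        refine ⟨b0, List.mem_cons_self .., ?_⟩
        have h1 : 0 < (b0 :: rest.map (fun p => PySem.Int.mod p.2 n_banks)).count b0 := by
          simp
        omega
      · intro _; rfl
    · rw [if_neg hc, ih]
      constructor
      · rintro ⟨x, hx, hge⟩
        rw [PySem.Dict.getD_insert] at hge
        by_cases hxb : x = b0
        · refine ⟨b0, List.mem_cons_self .., ?_⟩
          rw [if_pos hxb] at hge
          have hcount : (b0 :: rest.map (fun p => PySem.Int.mod p.2 n_banks)).count b0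
              = (rest.map (fun p => PySem.Int.mod p.2 n_banks)).count b0 + 1 := by simp
          rw [hxb] at hge
          omega
        · refine ⟨x, List.mem_cons_of_mem _ hx, ?_⟩
          rw [if_neg hxb] at hge
          have hbx : ¬ b0 = x := fun h => hxb h.symm
          simpa [List.count_cons, hbx] using hge
      · rintro ⟨x, hx, hge⟩
        by_cases hxb : x = b0
        · rw [hxb, List.count_cons_self] at hge
          by_cases hcnt : 0 < (rest.map (fun p => PySem.Int.mod p.2 n_banks)).count b0
          · refine ⟨b0, List.count_pos_iff.mp hcnt, ?_⟩
            rw [PySem.Dict.getD_insert, if_pos rfl]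
            omega
          · have h0 : (rest.map (fun p => PySem.Int.mod p.2 n_banks)).count b0 = 0 :=
              Nat.eq_zero_of_not_pos hcnt
            omega
        · rcases List.mem_cons.mp hx with h | h
          · exact absurd h hxb
          · refine ⟨x, h, ?_⟩
            rw [PySem.Dict.getD_insert, if_neg hxb]
            have hbx : ¬ b0 = x := fun h => hxb h.symm
            simpa [List.count_cons, hbx] using hge

-- ===== VERDICT (by name: the statement is the Claim_ definition above) =====
theorem has_bank_conflict_py_spec : Claim_equal_has_bank_conflict_py := by
  intro e n hv nb _ _
  unfold Spec_has_bank_conflict_py has_bank_conflict_py has_bank_conflict_py_alt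
  rw [Bool.eq_iff_iff]
  rw [pvALoop_iff]
  rw [List.any_eq_true]
  constructor
  · rintro ⟨b, hb, hge⟩
    exact ⟨b, (PySem.Set.mem_ofList _ _).mpr hb, by simpa using hge⟩
  · rintro ⟨b, hb, hge⟩
    exact ⟨b, (PySem.Set.mem_ofList _ _).mp hb, by simpa using hge⟩
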